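-- pv_equiv track=rewrite | github.com/Fexilus/MVE385-Code | examples/association_multi_object.py | add_initialized_to_current_tracks
-- ===== SOURCE A (Python) =====
-- def add_initialized_to_current_tracks(initialized_tracks,current_tracks,initialized_cov,current_cov,frame):
--     ind_remove = []
--     for t in range(len(initialized_tracks)):
--         track = initialized_tracks[t]
--
--         if(len(track)>=3): # It survived for three frames
--             current_tracks.append(track)
--             current_cov.append(initialized_cov[t])
--             # Save index for removal
--             ind_remove.append(t)
--
--     # Remove from list of initialized
--     for ind in sorted(ind_remove,reverse=True):
--         initialized_tracks.pop(ind)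
--         initialized_cov.pop(ind)
--     return(initialized_tracks,current_tracks,initialized_cov,current_cov)
-- ===== SOURCE B (Python) =====
-- def add_initialized_to_current_tracks(initialized_tracks, current_tracks, initialized_cov, current_cov, frame):
--     kept_tracks = []
--     moved = set()
--     for t, track in enumerate(initialized_tracks):
--         if len(track) >= 3:  # survived for three frames
--             current_tracks.append(track)
--             current_cov.append(initialized_cov[t])
--             moved.add(t)
--         else:
--             kept_tracks.append(track)
--     kept_cov = [c for i, c in enumerate(initialized_cov) if i not in moved]
--     initialized_tracks[:] = kept_tracks
--     initialized_cov[:] = kept_cov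
--     return (initialized_tracks, current_tracks, initialized_cov, current_cov)
-- ===== Notes on version B (the rewrite author's own statement) =====
-- stated objective: alternative
-- what changed: Replaces the index loop plus sorted-reverse pop() removal with one enumerate pass that partitions tracks and a single index-filtered rebuild of the covariance list, so no sorting and no repeated pops are needed.
import Mathlib
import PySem

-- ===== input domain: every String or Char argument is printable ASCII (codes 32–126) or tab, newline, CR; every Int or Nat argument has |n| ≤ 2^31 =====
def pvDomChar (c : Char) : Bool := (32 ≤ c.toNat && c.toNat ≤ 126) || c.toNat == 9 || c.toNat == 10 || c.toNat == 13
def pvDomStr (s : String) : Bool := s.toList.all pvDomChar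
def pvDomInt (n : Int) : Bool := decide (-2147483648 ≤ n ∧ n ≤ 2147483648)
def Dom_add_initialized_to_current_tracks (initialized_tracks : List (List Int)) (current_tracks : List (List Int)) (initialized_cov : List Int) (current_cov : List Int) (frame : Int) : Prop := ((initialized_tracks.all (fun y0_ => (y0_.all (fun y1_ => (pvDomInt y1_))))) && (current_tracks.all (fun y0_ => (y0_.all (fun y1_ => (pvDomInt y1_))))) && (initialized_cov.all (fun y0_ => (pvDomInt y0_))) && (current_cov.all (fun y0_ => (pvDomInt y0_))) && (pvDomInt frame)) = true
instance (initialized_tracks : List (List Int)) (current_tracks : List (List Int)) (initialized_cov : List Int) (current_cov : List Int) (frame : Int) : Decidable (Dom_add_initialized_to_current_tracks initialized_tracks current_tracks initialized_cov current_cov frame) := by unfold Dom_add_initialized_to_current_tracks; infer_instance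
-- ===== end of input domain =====

-- ===== PORT A =====
-- B replaces A's index-loop + sorted-reverse-pop removal by a single enumerate pass and an
-- index-filtered rebuild (objective: alternative — no sorting, no repeated pops).
-- A and B mutate initialized_tracks/initialized_cov/current_* in place identically; equivalence here is about the returned tuple.

-- step of A's first loop: append long tracks/covs, record index
def stepA (initialized_tracks : List (List Int)) (initialized_cov : List Int)
    (st : List (List Int) × List Int × List Int) (t : Int) :
    List (List Int) × List Int × List Int :=
  let track := PySem.List.pyGetD initialized_tracks t []
  if 3 ≤ track.length then
    (st.1 ++ [track], st.2.1 ++ [PySem.List.pyGetD initialized_cov t 0], st.2.2 ++ [t])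
  else st

-- step of A's removal loop: pop index ind from both lists (getD keeps the list where Python would raise; excluded by Pre_)
def popStep (p : List (List Int) × List Int) (ind : Int) : List (List Int) × List Int :=
  (((PySem.List.pop? p.1 ind).map Prod.snd).getD p.1,
   ((PySem.List.pop? p.2 ind).map Prod.snd).getD p.2)

def add_initialized_to_current_tracks (initialized_tracks : List (List Int)) (current_tracks : List (List Int)) (initialized_cov : List Int) (current_cov : List Int) (frame : Int) : List (List Int) × List (List Int) × List Int × List Int :=
  let r := (PySem.List.pyRange 0 (initialized_tracks.length : Int) 1).foldl
    (stepA initialized_tracks initialized_cov) (current_tracks, current_cov, ([] : List Int))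
  let p := (PySem.List.sorted r.2.2 (fun x => x) true).foldl popStep
    (initialized_tracks, initialized_cov)
  (p.1, r.1, p.2, r.2.1)

-- ===== PORT B =====
-- step of B's single pass over enumerate(initialized_tracks)
def stepB (initialized_cov : List Int)
    (st : List (List Int) × List Int × PySem.Set Int × List (List Int)) (p : Int × List Int) :
    List (List Int) × List Int × PySem.Set Int × List (List Int) :=
  if 3 ≤ p.2.length then
    (st.1 ++ [p.2], st.2.1 ++ [PySem.List.pyGetD initialized_cov p.1 0],
     PySem.Set.add st.2.2.1 p.1, st.2.2.2)
  else
    (st.1, st.2.1, st.2.2.1, st.2.2.2 ++ [p.2])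

def add_initialized_to_current_tracks_alt (initialized_tracks : List (List Int)) (current_tracks : List (List Int)) (initialized_cov : List Int) (current_cov : List Int) (frame : Int) : List (List Int) × List (List Int) × List Int × List Int :=
  let s := (PySem.List.enumerate initialized_tracks 0).foldl (stepB initialized_cov)
    (current_tracks, current_cov, PySem.Set.empty, ([] : List (List Int)))
  let keptCov := ((PySem.List.enumerate initialized_cov 0).filter
      (fun p => !(PySem.Set.contains s.2.2.1 p.1))).map (fun p => p.2)
  (s.2.2.2, s.1, keptCov, s.2.1)

-- ===== PRECONDITION & SPEC =====
-- Pre_ excludes exactly the inputs where Python A raises IndexError: a track with length >= 3 at an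
-- index t with no matching entry in initialized_cov (initialized_cov[t] / .pop(t) out of range).
def Pre_add_initialized_to_current_tracks (initialized_tracks : List (List Int)) (current_tracks : List (List Int)) (initialized_cov : List Int) (current_cov : List Int) (frame : Int) : Prop :=
  ∀ t : Nat, t < initialized_tracks.length → 3 ≤ (initialized_tracks.getD t []).length →
    t < initialized_cov.length
instance (initialized_tracks : List (List Int)) (current_tracks : List (List Int)) (initialized_cov : List Int) (current_cov : List Int) (frame : Int) : Decidable (Pre_add_initialized_to_current_tracks initialized_tracks current_tracks initialized_cov current_cov frame) := by unfold Pre_add_initialized_to_current_tracks; infer_instance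

def pvWitness_add_initialized_to_current_tracks : List (List Int) × List (List Int) × List Int × List Int × Int :=
  ([[1, 2, 3], [4]], [[9, 9]], [5, 6], [7], 2)

def Spec_add_initialized_to_current_tracks (initialized_tracks : List (List Int)) (current_tracks : List (List Int)) (initialized_cov : List Int) (current_cov : List Int) (frame : Int) (out : List (List Int) × List (List Int) × List Int × List Int) : Prop := out = add_initialized_to_current_tracks_alt initialized_tracks current_tracks initialized_cov current_cov frame
instance (initialized_tracks : List (List Int)) (current_tracks : List (List Int)) (initialized_cov : List Int) (current_cov : List Int) (frame : Int) (out : List (List Int) × List (List Int) × List Int × List Int) : Decidable (Spec_add_initialized_to_current_tracks initialized_tracks current_tracks initialized_cov current_cov frame out) := by unfold Spec_add_initialized_to_current_tracks; infer_instance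

-- ===== CLAIM (what is proved, stated in full; the proofs are below) =====
def Claim_equal_add_initialized_to_current_tracks : Prop := ∀ (initialized_tracks : List (List Int)) (current_tracks : List (List Int)) (initialized_cov : List Int) (current_cov : List Int) (frame : Int), Dom_add_initialized_to_current_tracks initialized_tracks current_tracks initialized_cov current_cov frame → Pre_add_initialized_to_current_tracks initialized_tracks current_tracks initialized_cov current_cov frame → Spec_add_initialized_to_current_tracks initialized_tracks current_tracks initialized_cov current_cov frame (add_initialized_to_current_tracks initialized_tracks current_tracks initialized_cov current_cov frame)

-- ===== LEMMAS AND PROOFS =====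

-- enumeration with Nat indices (proof-side mirror of Python's enumerate)
def enumN {alpha : Type} : List alpha → Nat → List (Nat × alpha)
  | [], _ => []
  | x :: tl, k => (k, x) :: enumN tl (k + 1)

-- remove from xs the positions (counted from k) listed in R
def dropIdx {alpha : Type} : List alpha → List Nat → Nat → List alpha
  | [], _, _ => []
  | x :: tl, R, k => if k ∈ R then dropIdx tl R (k + 1) else x :: dropIdx tl R (k + 1)

def isLong (tr : List Int) : Bool := decide (3 ≤ tr.length)

def longs (it : List (List Int)) (a : Nat) : List (Nat × List Int) :=
  (enumN it a).filter (fun p => isLong p.2)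

def shorts (it : List (List Int)) (a : Nat) : List (Nat × List Int) :=
  (enumN it a).filter (fun p => !isLong p.2)

lemma enumN_fst_ge {alpha : Type} : ∀ (xs : List alpha) (k : Nat) (p : Nat × alpha),
    p ∈ enumN xs k → k ≤ p.1 := by
  intro xs
  induction xs with
  | nil => intro k p h; simp [enumN] at h
  | cons x tl ih =>
    intro k p h
    simp only [enumN, List.mem_cons] at h
    rcases h with h | h
    · simp [h]
    · have := ih (k + 1) p h; omega


lemma enumN_mem_getElem {alpha : Type} : ∀ (xs : List alpha) (k : Nat) (p : Nat × alpha),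
    p ∈ enumN xs k → ∃ j, p.1 = k + j ∧ xs[j]? = some p.2 := by
  intro xs
  induction xs with
  | nil => intro k p h; simp [enumN] at h
  | cons x tl ih =>
    intro k p h
    simp only [enumN, List.mem_cons] at h
    rcases h with h | h
    · exact ⟨0, by simp [h]⟩
    · obtain ⟨j, hj1, hj2⟩ := ih (k + 1) p h
      exact ⟨j + 1, by omega, by simpa using hj2⟩


lemma enumN_pairwise {alpha : Type} : ∀ (xs : List alpha) (k : Nat),
    (enumN xs k).Pairwise (fun p q => p.1 < q.1) := by
  intro xs
  induction xs with
  | nil => intro k; simp [enumN]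
  | cons x tl ih =>
    intro k
    refine List.pairwise_cons.mpr ⟨?_, ih (k + 1)⟩
    intro p hp
    have := enumN_fst_ge tl (k + 1) p hp
    simpa using by omega


lemma dropIdx_cons_lt {alpha : Type} : ∀ (tl : List alpha) (i : Nat) (R : List Nat) (k : Nat),
    i < k → dropIdx tl (i :: R) k = dropIdx tl R k := by
  intro tl
  induction tl with
  | nil => intro i R k h; simp [dropIdx]
  | cons x tl ih =>
    intro i R k h
    have hne : ¬ k = i := by omega
    simp only [dropIdx, List.mem_cons, hne, false_or]
    by_cases hk : k ∈ R
    · simp [hk, ih i R (k + 1) (by omega)]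
    · simp [hk, ih i R (k + 1) (by omega)]


lemma dropIdx_len {alpha : Type} : ∀ (xs : List alpha) (k i : Nat) (rest : List Nat),
    (∀ j ∈ rest, i < j) → k ≤ i → i - k < xs.length →
    i - k < (dropIdx xs rest k).length := by
  intro xs
  induction xs with
  | nil => intro k i rest h hk hlen; simp at hlen
  | cons x tl ih =>
    intro k i rest h hk hlen
    have hkr : k ∉ rest := fun hm => by have := h k hm; omega
    simp only [dropIdx, if_neg hkr, List.length_cons]
    by_cases hki : k = i
    · omega
    · have := ih (k + 1) i rest h (by omega) (by simp at hlen; omega)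
      omega


lemma dropIdx_erase {alpha : Type} : ∀ (xs : List alpha) (k i : Nat) (rest : List Nat),
    (∀ j ∈ rest, i < j) → k ≤ i → i - k < xs.length →
    (dropIdx xs rest k).eraseIdx (i - k) = dropIdx xs (i :: rest) k := by
  intro xs
  induction xs with
  | nil => intro k i rest h hk hlen; simp at hlen
  | cons x tl ih =>
    intro k i rest h hk hlen
    have hkr : k ∉ rest := fun hm => by have := h k hm; omega
    by_cases hki : k = i
    · subst hki
      simp only [dropIdx, if_neg hkr, List.mem_cons, true_or, if_pos,
        Nat.sub_self, List.eraseIdx_cons_zero]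
      exact (dropIdx_cons_lt tl k rest (k + 1) (by omega)).symm
    · have hik : ¬ (k = i ∨ k ∈ rest) := by
        rintro (h1 | h1)
        · exact hki h1
        · exact hkr h1
      simp only [dropIdx, if_neg hkr, List.mem_cons, if_neg hik]
      have hpos : i - k = (i - (k + 1)) + 1 := by omega
      rw [hpos, List.eraseIdx_cons_succ]
      have := ih (k + 1) i rest h (by omega) (by simp at hlen; omega)
      rw [this]


-- popping a strictly descending list of valid indices = removing those positions
lemma dropIdx_nil {alpha : Type} : ∀ (xs : List alpha) (k : Nat), dropIdx xs [] k = xs := by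
  intro xs
  induction xs with
  | nil => intro k; simp [dropIdx]
  | cons x tl ih => intro k; simp [dropIdx, ih]

-- popping a strictly descending list of valid indices = removing those positions
lemma foldr_pop {alpha : Type} : ∀ (R : List Nat) (xs : List alpha),
    R.Pairwise (· < ·) → (∀ i ∈ R, i < xs.length) →
    R.foldr (fun i ys => ((PySem.List.pop? ys ((i : Nat) : Int)).map Prod.snd).getD ys) xs
      = dropIdx xs R 0 := by
  intro R
  induction R with
  | nil => intro xs _ _; simp [dropIdx_nil]
  | cons i rest ih =>
    intro xs hp hb
    have hpc := List.pairwise_cons.mp hp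
    have hrec := ih xs hpc.2 (fun j hj => hb j (List.mem_cons_of_mem i hj))
    simp only [List.foldr_cons, hrec]
    have hi : i < xs.length := hb i List.mem_cons_self
    have hlen : i < (dropIdx xs rest 0).length := by
      have := dropIdx_len xs 0 i rest hpc.1 (Nat.zero_le i) (by omega)
      omega
    rw [PySem.List.pop?_natCast (dropIdx xs rest 0) i hlen]
    simp only [Option.map_some, Option.getD_some]
    have := dropIdx_erase xs 0 i rest hpc.1 (Nat.zero_le i) (by omega)
    simpa using this

lemma dropIdx_longs : ∀ (xs : List (List Int)) (k : Nat),
    dropIdx xs (((enumN xs k).filter (fun p => isLong p.2)).map Prod.fst) k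
      = ((enumN xs k).filter (fun p => !isLong p.2)).map Prod.snd := by
  intro xs
  induction xs with
  | nil => intro k; simp [enumN, dropIdx]
  | cons x tl ih =>
    intro k
    have htail : ∀ q ∈ ((enumN tl (k + 1)).filter (fun p => isLong p.2)).map Prod.fst, k < q := by
      intro q hq
      obtain ⟨p, hp, hpq⟩ := List.mem_map.mp hq
      have := enumN_fst_ge tl (k + 1) p (List.mem_of_mem_filter hp)
      omega
    by_cases hx : isLong x = true
    · have h1 : (enumN (x :: tl) k).filter (fun p => isLong p.2)
          = (k, x) :: (enumN tl (k + 1)).filter (fun p => isLong p.2) := by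
        simp [enumN, hx]
      have h2 : (enumN (x :: tl) k).filter (fun p => !isLong p.2)
          = (enumN tl (k + 1)).filter (fun p => !isLong p.2) := by
        simp [enumN, hx]
      rw [h1, h2, List.map_cons]
      show dropIdx (x :: tl) _ k = _
      simp only [dropIdx, if_pos (List.mem_cons_self)]
      rw [dropIdx_cons_lt tl k _ (k + 1) (by omega)]
      exact ih (k + 1)
    · have hxb : isLong x = false := by simpa using hx
      have h1 : (enumN (x :: tl) k).filter (fun p => isLong p.2)
          = (enumN tl (k + 1)).filter (fun p => isLong p.2) := by
        rw [show enumN (x :: tl) k = (k, x) :: enumN tl (k + 1) from rfl,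
          List.filter_cons_of_neg (by simp [hxb])]
      have h2 : (enumN (x :: tl) k).filter (fun p => !isLong p.2)
          = (k, x) :: (enumN tl (k + 1)).filter (fun p => !isLong p.2) := by
        rw [show enumN (x :: tl) k = (k, x) :: enumN tl (k + 1) from rfl,
          List.filter_cons_of_pos (by simp [hxb])]
      rw [h1, h2, List.map_cons]
      have hknot : k ∉ ((enumN tl (k + 1)).filter (fun p => isLong p.2)).map Prod.fst := by
        intro hm; exact absurd (htail k hm) (by omega)
      show dropIdx (x :: tl) _ k = _
      simp only [dropIdx, if_neg hknot]
      rw [ih (k + 1)]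

lemma icFilter : ∀ (ic : List Int) (k : Nat) (R : List Nat),
    ((PySem.List.enumerate ic (k : Int)).filter
        (fun p => !(PySem.Set.contains (R.map (fun n => ((n : Nat) : Int))) p.1))).map (fun p => p.2)
      = dropIdx ic R k := by
  intro ic
  induction ic with
  | nil => intro k R; simp [dropIdx, PySem.List.enumerate]
  | cons c tl ih =>
    intro k R
    rw [PySem.List.enumerate_cons]
    have hcast : ((k : Int) + 1) = (((k + 1 : Nat)) : Int) := by push_cast; ring
    by_cases hk : k ∈ R
    · rw [List.filter_cons_of_neg (by simpa using hk)]
      rw [hcast, ih (k + 1) R]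
      simp [dropIdx, hk]
    · rw [List.filter_cons_of_pos (by simpa using hk), List.map_cons]
      rw [hcast, ih (k + 1) R]
      simp [dropIdx, hk]

lemma loopA (it : List (List Int)) (ic : List Int) :
    ∀ (tl : List (List Int)) (a : Nat), it.drop a = tl →
    ∀ (st : List (List Int) × List Int × List Int),
    (PySem.List.pyRange (a : Int) (it.length : Int) 1).foldl (stepA it ic) st
      = (st.1 ++ (longs tl a).map (fun p => p.2),
         st.2.1 ++ (longs tl a).map (fun p => ic.getD p.1 0),
         st.2.2 ++ (longs tl a).map (fun p => ((p.1 : Nat) : Int))) := by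
  intro tl
  induction tl with
  | nil =>
    intro a h st
    have hlen : it.length ≤ a := by
      have := List.drop_eq_nil_iff.mp h
      omega
    rw [PySem.List.pyRange_one_eq_nil (by exact_mod_cast hlen)]
    simp [longs, enumN]
  | cons x tl' ih =>
    intro a h st
    have ha : a < it.length := by
      by_contra hcon
      rw [List.drop_eq_nil_of_le (by omega)] at h
      simp at h
    have hget : it[a]? = some x := by
      have h0 : (it.drop a)[0]? = some x := by rw [h]; rfl
      rw [List.getElem?_drop] at h0
      simpa using h0
    have hgetD : it.getD a ([] : List Int) = x := by
      rw [List.getD_eq_getElem?_getD, hget]; rfl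
    have hdrop : it.drop (a + 1) = tl' := by
      have hd : it.drop (a + 1) = (it.drop a).drop 1 := by
        rw [List.drop_drop]
      rw [hd, h]; rfl
    rw [PySem.List.pyRange_one_cons (by exact_mod_cast ha), List.foldl_cons]
    have hcast : ((a : Int) + 1) = (((a + 1 : Nat)) : Int) := by push_cast; ring
    rw [hcast, ih (a + 1) hdrop]
    by_cases hx : 3 ≤ x.length
    · have hstep : stepA it ic st (a : Int)
          = (st.1 ++ [x], st.2.1 ++ [PySem.List.pyGetD ic (a : Int) 0], st.2.2 ++ [(a : Int)]) := by
        simp [stepA, PySem.List.pyGetD_natCast, List.getD_eq_getElem?_getD, hget, hx]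
      have hl : longs (x :: tl') a = (a, x) :: longs tl' (a + 1) := by
        rw [longs, show enumN (x :: tl') a = (a, x) :: enumN tl' (a + 1) from rfl,
          List.filter_cons_of_pos (by simp [isLong, hx])]
        rfl
      rw [hstep, hl]
      simp [PySem.List.pyGetD_natCast]
    · have hstep : stepA it ic st (a : Int) = st := by
        simp [stepA, PySem.List.pyGetD_natCast, List.getD_eq_getElem?_getD, hget, hx]
      have hl : longs (x :: tl') a = longs tl' (a + 1) := by
        rw [longs, show enumN (x :: tl') a = (a, x) :: enumN tl' (a + 1) from rfl,
          List.filter_cons_of_neg (by simp [isLong, hx])]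
        rfl
      rw [hstep, hl]


lemma loopB (ic : List Int) :
    ∀ (tl : List (List Int)) (a : Nat) (ct : List (List Int)) (cc : List Int)
      (m : PySem.Set Int) (kept : List (List Int)), (∀ j ∈ m, j < (a : Int)) →
    (PySem.List.enumerate tl (a : Int)).foldl (stepB ic) (ct, cc, m, kept)
      = (ct ++ (longs tl a).map (fun p => p.2),
         cc ++ (longs tl a).map (fun p => ic.getD p.1 0),
         m ++ (longs tl a).map (fun p => ((p.1 : Nat) : Int)),
         kept ++ (shorts tl a).map (fun p => p.2)) := by
  intro tl
  induction tl with
  | nil =>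
    intro a ct cc m kept hinv
    simp [PySem.List.enumerate, longs, shorts, enumN]
  | cons x tl' ih =>
    intro a ct cc m kept hinv
    rw [PySem.List.enumerate_cons, List.foldl_cons]
    have hcast : ((a : Int) + 1) = (((a + 1 : Nat)) : Int) := by push_cast; ring
    by_cases hx : 3 ≤ x.length
    · have hnm : ((a : Nat) : Int) ∉ m := fun hm => absurd (hinv _ hm) (by omega)
      have hstep : stepB ic (ct, cc, m, kept) ((a : Int), x)
          = (ct ++ [x], cc ++ [PySem.List.pyGetD ic (a : Int) 0], m ++ [(a : Int)], kept) := by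
        simp [stepB, hx, PySem.Set.add_of_not_mem hnm]
      have hinv' : ∀ j ∈ m ++ [((a : Nat) : Int)], j < ((a + 1 : Nat) : Int) := by
        intro j hj
        rcases List.mem_append.mp hj with hj | hj
        · have := hinv j hj; push_cast; omega
        · simp at hj; subst hj; push_cast; omega
      rw [hstep, hcast, ih (a + 1) _ _ _ _ hinv']
      have hl : longs (x :: tl') a = (a, x) :: longs tl' (a + 1) := by
        rw [longs, show enumN (x :: tl') a = (a, x) :: enumN tl' (a + 1) from rfl,
          List.filter_cons_of_pos (by simp [isLong, hx])]
        rfl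
      have hs : shorts (x :: tl') a = shorts tl' (a + 1) := by
        rw [shorts, show enumN (x :: tl') a = (a, x) :: enumN tl' (a + 1) from rfl,
          List.filter_cons_of_neg (by simp [isLong, hx])]
        rfl
      rw [hl, hs]
      simp [PySem.List.pyGetD_natCast]
    · have hstep : stepB ic (ct, cc, m, kept) ((a : Int), x)
          = (ct, cc, m, kept ++ [x]) := by
        simp [stepB, hx]
      have hinv' : ∀ j ∈ m, j < ((a + 1 : Nat) : Int) := by
        intro j hj
        have := hinv j hj; push_cast; omega
      rw [hstep, hcast, ih (a + 1) _ _ _ _ hinv']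
      have hl : longs (x :: tl') a = longs tl' (a + 1) := by
        rw [longs, show enumN (x :: tl') a = (a, x) :: enumN tl' (a + 1) from rfl,
          List.filter_cons_of_neg (by simp [isLong, hx])]
        rfl
      have hs : shorts (x :: tl') a = (a, x) :: shorts tl' (a + 1) := by
        rw [shorts, show enumN (x :: tl') a = (a, x) :: enumN tl' (a + 1) from rfl,
          List.filter_cons_of_pos (by simp [isLong, hx])]
        rfl
      rw [hl, hs]
      simp


lemma foldr_popStep_pair : ∀ (l : List Int) (xs : List (List Int)) (ys : List Int),
    l.foldr (fun i p => popStep p i) (xs, ys)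
      = (l.foldr (fun i u => ((PySem.List.pop? u i).map Prod.snd).getD u) xs,
         l.foldr (fun i u => ((PySem.List.pop? u i).map Prod.snd).getD u) ys) := by
  intro l
  induction l with
  | nil => intro xs ys; rfl
  | cons i l ih =>
    intro xs ys
    simp only [List.foldr_cons, ih]
    rfl

-- ===== VERDICT (by name: the statement is the Claim_ definition above) =====
theorem add_initialized_to_current_tracks_spec : Claim_equal_add_initialized_to_current_tracks := by
  intro it ct ic cc frame hDom hPre
  unfold Spec_add_initialized_to_current_tracks
  have hL : longs it 0 = (enumN it 0).filter (fun p => isLong p.2) := rfl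
  -- index list of the long tracks, as naturals
  have hpwN : ((longs it 0).map Prod.fst).Pairwise (· < ·) := by
    refine List.pairwise_map.mpr ?_
    exact List.Pairwise.filter _ (enumN_pairwise it 0)
  have hmemL : ∀ p ∈ longs it 0, p.1 < it.length ∧ it.getD p.1 ([] : List Int) = p.2 := by
    intro p hp
    obtain ⟨j, hj1, hj2⟩ := enumN_mem_getElem it 0 p (List.mem_of_mem_filter hp)
    have hjl : j < it.length := (List.getElem?_eq_some_iff.mp hj2).1
    have hj0 : p.1 = j := by omega
    refine ⟨by omega, ?_⟩
    rw [List.getD_eq_getElem?_getD, hj0, hj2]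
    rfl
  have hItB : ∀ i ∈ (longs it 0).map Prod.fst, i < it.length := by
    intro i hi
    obtain ⟨p, hp, hpe⟩ := List.mem_map.mp hi
    have := (hmemL p hp).1
    omega
  have hIcB : ∀ i ∈ (longs it 0).map Prod.fst, i < ic.length := by
    intro i hi
    obtain ⟨p, hp, hpe⟩ := List.mem_map.mp hi
    obtain ⟨hlt, hgd⟩ := hmemL p hp
    have hlong : isLong p.2 = true := (List.mem_filter.mp hp).2
    have h3 : 3 ≤ p.2.length := by simpa [isLong] using hlong
    subst hpe
    exact hPre p.1 hlt (by rw [hgd]; exact h3)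
  -- the Int index list A sorts and B stores in its set
  have hSI : (longs it 0).map (fun p => ((p.1 : Nat) : Int))
      = ((longs it 0).map Prod.fst).map (fun n => ((n : Nat) : Int)) := by
    rw [List.map_map]; rfl
  have hpwI : ((longs it 0).map (fun p => ((p.1 : Nat) : Int))).Pairwise (· < ·) := by
    rw [hSI]
    refine List.pairwise_map.mpr (hpwN.imp ?_)
    intro a b hab
    exact_mod_cast hab
  have hsorted : PySem.List.sorted ((longs it 0).map (fun p => ((p.1 : Nat) : Int))) (fun x => x) true
      = ((longs it 0).map (fun p => ((p.1 : Nat) : Int))).reverse := by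
    refine PySem.List.sorted_rev_eq_of_perm_of_pairwise_gt _ _ _ (List.reverse_perm _) ?_
    rw [List.pairwise_reverse]
    exact hpwI
  -- pops on each component in descending index order = removing those positions
  have hfoldr : ∀ {alpha : Type} (xs : List alpha), (∀ i ∈ (longs it 0).map Prod.fst, i < xs.length) →
      ((longs it 0).map (fun p => ((p.1 : Nat) : Int))).foldr
        (fun i u => ((PySem.List.pop? u i).map Prod.snd).getD u) xs
      = dropIdx xs ((longs it 0).map Prod.fst) 0 := by
    intro alpha xs hb
    rw [hSI, List.foldr_map]
    exact foldr_pop ((longs it 0).map Prod.fst) xs hpwN hb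
  -- evaluate A
  have hA : add_initialized_to_current_tracks it ct ic cc frame
      = (dropIdx it ((longs it 0).map Prod.fst) 0,
         ct ++ (longs it 0).map (fun p => p.2),
         dropIdx ic ((longs it 0).map Prod.fst) 0,
         cc ++ (longs it 0).map (fun p => ic.getD p.1 0)) := by
    have h0 := loopA it ic it 0 (by simp) (ct, cc, ([] : List Int))
    simp only [Nat.cast_zero] at h0
    simp only [add_initialized_to_current_tracks, h0, List.nil_append]
    rw [hsorted, List.foldl_reverse]
    have hpair := foldr_popStep_pair ((longs it 0).map (fun p => ((p.1 : Nat) : Int))) it ic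
    simp only [hpair]
    rw [hfoldr it hItB, hfoldr ic hIcB]
  -- evaluate B
  have hB : add_initialized_to_current_tracks_alt it ct ic cc frame
      = ((shorts it 0).map (fun p => p.2),
         ct ++ (longs it 0).map (fun p => p.2),
         dropIdx ic ((longs it 0).map Prod.fst) 0,
         cc ++ (longs it 0).map (fun p => ic.getD p.1 0)) := by
    have hinv0 : ∀ j ∈ (PySem.Set.empty : PySem.Set Int), j < ((0 : Nat) : Int) := by
      intro j hj
      simp [PySem.Set.empty] at hj
    have h1 := loopB ic it 0 ct cc PySem.Set.empty [] hinv0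
    simp only [Nat.cast_zero] at h1
    have h2 := icFilter ic 0 ((longs it 0).map Prod.fst)
    simp only [Nat.cast_zero] at h2
    simp only [add_initialized_to_current_tracks_alt, h1]
    simp only [PySem.Set.empty, List.nil_append]
    rw [← hSI] at h2
    rw [h2]
  rw [hA, hB]
  have hfirst : dropIdx it ((longs it 0).map Prod.fst) 0 = (shorts it 0).map (fun p => p.2) :=
    dropIdx_longs it 0
  rw [hfirst]
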